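-- pv_equiv track=rewrite | github.com/yuanfu-bio/FBcount | scripts/count_UMI.py | get_pibc_new_umis
-- ===== SOURCE A (Python) =====
-- from copy import deepcopy
--
-- def is_below_hamming_threshold(str1, str2, threshold):
--     distance = 0
--     for ch1, ch2 in zip(str1, str2):
--         if ch1 != ch2:
--             distance += 1
--             if distance > threshold:
--                 return 0
--     return 1
--
-- def correct_umi(umi_count):
--     MAXDIST_CORRECT_umi = 1
--     umi_correct_mapping = {}
--     keys_sorted, values_sorted = zip(*sorted(umi_count.items(), key=lambda item: item[1], reverse=False))
--     keys_sorted_rev, values_sorted_rev = zip(*sorted(umi_count.items(), key=lambda item: item[1], reverse=True))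
--     umi_raw_kinds = len(keys_sorted)
--     min_count_ten_mul = values_sorted[0]*10
--
--     for idx in range(umi_raw_kinds):
--         raw_umi = keys_sorted_rev[idx]
--         mul_low = values_sorted_rev[idx]//10
--         for i in range(umi_raw_kinds):
--             less_umi = keys_sorted[i]
--             if less_umi not in umi_correct_mapping:
--                 if values_sorted[i] <= mul_low:
--                     if is_below_hamming_threshold(keys_sorted[i], raw_umi, MAXDIST_CORRECT_umi):
--                         umi_correct_mapping[less_umi] = raw_umi
--                 else:
--                     break
--     return umi_correct_mapping
--
-- def get_pibc_new_umis(dic_A):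
--     '''step2'''
--     dic_B = deepcopy(dic_A)
--     # 定义一个新字典, 用来记录哪些umi得到了校正
--     correct_list = {}
--
--     n = 0
--     for bc, umi_counts in dic_A.items():
--         n += 1
--         umi_count_new = deepcopy(umi_counts)
--         umi_correct_mapping = correct_umi(umi_counts)
--
--         correct_list[bc] = umi_correct_mapping
--
--         for key, value in umi_correct_mapping.items():
--             umi_count_new[umi_correct_mapping[key]] += umi_counts[key]
--             umi_count_new[key] = 0
--
--         umi_count_new_bak = deepcopy(umi_count_new)
--         for key, value in umi_count_new_bak.items():
--             if value == 0:
--                 del umi_count_new[key]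
--
--         dic_B[bc] = umi_count_new
--     return dic_B, correct_list
-- ===== SOURCE B (Python) =====
-- def get_pibc_new_umis(dic_A):
--     '''step2'''
--     dic_B = {}
--     correct_list = {}
--     for bc, umi_counts in dic_A.items():
--         mapping = _correct_umi(umi_counts)
--         correct_list[bc] = mapping
--         new = dict(umi_counts)
--         for u, raw in mapping.items():
--             new[raw] += umi_counts[u]
--             new[u] = 0
--         dic_B[bc] = {u: c for u, c in new.items() if c != 0}
--     return dic_B, correct_list
--
--
-- def _correct_umi(umi_counts):
--     # Each UMI joins the cluster of its strongest admissible representative: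
--     # the highest-count UMI (stable tie-break) whose count//10 still reaches it
--     # and which differs from it in at most one position.  The correction map
--     # lists clusters representative by representative, strongest first.
--     desc = sorted(umi_counts.items(), key=lambda kv: kv[1], reverse=True)
--     clusters = {}
--     for u, c in sorted(umi_counts.items(), key=lambda kv: kv[1]):
--         for r, (raw, rc) in enumerate(desc):
--             if rc // 10 < c:
--                 break  # representatives are count-sorted: none further qualifies
--             if sum(a != b for a, b in zip(u, raw)) <= 1:
--                 clusters.setdefault(r, []).append(u)
--                 break
--     return {u: raw for r, (raw, rc) in enumerate(desc) for u in clusters.get(r, [])}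
-- ===== Notes on version B (the rewrite author's own statement) =====
-- stated objective: alternative
-- what changed: B inverts the clustering direction: instead of A's outer loop over representatives that absorbs still-unmapped weaker UMIs (nested scans over two sort orders mutating a shared mapping, then in-place +=/=0 dict surgery with a deepcopy snapshot and a deletion pass), B lets each UMI pick its strongest admissible representative in one first-match search, groups the picks into clusters, and rebuilds the counts by plainly applying the correction map and keeping the nonzero entries; …
-- crash fix: On inputs where some barcode's UMI dict is empty, A's zip(*sorted(...)) raises ValueError; B returns that barcode with an empty count dict and an empty correction map. — e.g. on get_pibc_new_umis([("b", [])]): A raises ValueError, B returns ([("b", [])], [("b", [])])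
import Mathlib
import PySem

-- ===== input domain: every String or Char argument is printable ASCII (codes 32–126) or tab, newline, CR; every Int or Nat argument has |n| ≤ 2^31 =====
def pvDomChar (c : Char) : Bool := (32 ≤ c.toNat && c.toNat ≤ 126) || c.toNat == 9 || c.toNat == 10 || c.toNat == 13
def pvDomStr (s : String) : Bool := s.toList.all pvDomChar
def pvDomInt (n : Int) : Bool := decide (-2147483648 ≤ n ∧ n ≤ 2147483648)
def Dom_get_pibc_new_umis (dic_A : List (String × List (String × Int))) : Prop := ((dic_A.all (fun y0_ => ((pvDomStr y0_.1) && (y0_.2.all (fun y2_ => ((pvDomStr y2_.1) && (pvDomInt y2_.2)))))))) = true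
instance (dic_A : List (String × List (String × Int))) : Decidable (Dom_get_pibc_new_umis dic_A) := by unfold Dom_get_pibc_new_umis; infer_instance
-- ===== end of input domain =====

-- B inverts the clustering direction: each UMI picks its strongest admissible representative
-- (A lets each representative absorb the remaining weaker UMIs) and the merged counts are
-- rebuilt by plain application of the map; objective: alternative (same asymptotic cost).

-- ===== PORT A =====

-- is_below_hamming_threshold: the loop over zip(str1, str2) with early return 0
def pvHamLoopA (threshold : Int) (dist : Int) : List (Char × Char) → Int
  | [] => 1
  | p :: rest =>
    if p.1 ≠ p.2 then
      (if dist + 1 > threshold then 0 else pvHamLoopA threshold (dist + 1) rest)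
    else pvHamLoopA threshold dist rest

def is_below_hamming_threshold (str1 str2 : String) (threshold : Int) : Int :=
  pvHamLoopA threshold 0 (str1.toList.zip str2.toList)

-- the inner 'for i in range(umi_raw_kinds)' loop of correct_umi, iterating the
-- ascending (keys_sorted[i], values_sorted[i]) pairs, with its break
def pvInnerA (raw : String) (mulLow : Int) :
    PySem.Dict String String → List (String × Int) → PySem.Dict String String
  | m, [] => m
  | m, p :: rest =>
    if m.contains p.1 then pvInnerA raw mulLow m rest
    else
      if p.2 ≤ mulLow then
        (if is_below_hamming_threshold p.1 raw 1 ≠ 0 then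
          pvInnerA raw mulLow (m.insert p.1 raw) rest
        else pvInnerA raw mulLow m rest)
      else m

def correct_umi (umi_count : PySem.Dict String Int) : PySem.Dict String String :=
  -- keys_sorted/values_sorted (resp. _rev) are the components of these pair lists
  let ascP := PySem.List.sorted umi_count.items (fun item => item.2) false
  let descP := PySem.List.sorted umi_count.items (fun item => item.2) true
  let _min_count_ten_mul := (PySem.List.pyGetD (ascP.map (fun p => p.2)) 0 0) * 10  -- computed, never used (as in A)
  -- for idx in range(umi_raw_kinds): raw = keys_sorted_rev[idx]; mul_low = values_sorted_rev[idx]//10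
  descP.foldl (fun m p => pvInnerA p.1 (PySem.Int.floordiv p.2 10) m ascP) PySem.Dict.empty

-- the two mutation passes of A's per-barcode body: += / = 0 over the mapping, then del of zero entries
def pvApplyA (umi_counts : PySem.Dict String Int) (mapping : PySem.Dict String String) :
    PySem.Dict String Int :=
  let new1 := mapping.items.foldl
    (fun nw kv => (nw.modify kv.2 0 (fun x => x + umi_counts.getD kv.1 0)).insert kv.1 0)
    umi_counts
  new1.items.foldl (fun nw kv => if kv.2 = 0 then nw.erase kv.1 else nw) new1

def get_pibc_new_umis (dic_A : List (String × List (String × Int))) :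
    (List (String × List (String × Int))) × (List (String × List (String × String))) :=
  let dA : PySem.Dict String (PySem.Dict String Int) :=
    PySem.Dict.ofList (dic_A.map (fun p => (p.1, PySem.Dict.ofList p.2)))
  -- state: (dic_B, correct_list, n); dic_B starts as deepcopy(dic_A)
  let res := dA.items.foldl
    (fun st p =>
      (st.1.insert p.1 (pvApplyA p.2 (correct_umi p.2)),
       st.2.1.insert p.1 (correct_umi p.2),
       st.2.2 + 1))
    (dA, PySem.Dict.empty, (0 : Int))
  (res.1.items.map (fun q => (q.1, q.2.items)),
   res.2.1.items.map (fun q => (q.1, q.2.items)))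

-- ===== PORT B =====

-- the inner 'for r, (raw, rc) in enumerate(desc)' search with its two breaks
def pvFirstTgtB (u : String) (c : Int) : Int → List (String × Int) → Option Int
  | _, [] => none
  | r, p :: rest =>
    if PySem.Int.floordiv p.2 10 < c then none  -- break: representatives are count-sorted
    else if ((u.toList.zip p.1.toList).map (fun q => if q.1 ≠ q.2 then (1 : Int) else 0)).sum ≤ 1
      then some r
    else pvFirstTgtB u c (r + 1) rest

def pvCorrectB (umi_counts : PySem.Dict String Int) : PySem.Dict String String :=
  let descP := PySem.List.sorted umi_counts.items (fun kv => kv.2) true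
  -- clusters: for each UMI (ascending count), the index of its chosen representative
  let clusters : PySem.Dict Int (List String) :=
    (PySem.List.sorted umi_counts.items (fun kv => kv.2) false).foldl
      (fun d p =>
        match pvFirstTgtB p.1 p.2 0 descP with
        | some r => d.modify r [] (fun l => l ++ [p.1])   -- clusters.setdefault(r, []).append(u)
        | none => d)
      PySem.Dict.empty
  -- {u: raw for r, (raw, rc) in enumerate(desc) for u in clusters.get(r, [])}
  (PySem.List.enumerate descP).foldl
    (fun m rp => (clusters.getD rp.1 []).foldl (fun m u => m.insert u rp.2.1) m)
    PySem.Dict.empty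

-- new = dict(umi_counts); apply the corrections; keep the nonzero counts
def pvMergeB (umi_counts : PySem.Dict String Int) (mapping : PySem.Dict String String) :
    PySem.Dict String Int :=
  let nw := mapping.items.foldl
    (fun nw kv => (nw.modify kv.2 0 (fun x => x + umi_counts.getD kv.1 0)).insert kv.1 0)
    umi_counts
  nw.items.foldl (fun d p => if p.2 ≠ 0 then d.insert p.1 p.2 else d) PySem.Dict.empty

def get_pibc_new_umis_alt (dic_A : List (String × List (String × Int))) :
    (List (String × List (String × Int))) × (List (String × List (String × String))) :=
  let dA : PySem.Dict String (PySem.Dict String Int) :=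
    PySem.Dict.ofList (dic_A.map (fun p => (p.1, PySem.Dict.ofList p.2)))
  let res := dA.items.foldl
    (fun st p =>
      (st.1.insert p.1 (pvMergeB p.2 (pvCorrectB p.2)),
       st.2.insert p.1 (pvCorrectB p.2)))
    (PySem.Dict.empty, PySem.Dict.empty)
  (res.1.items.map (fun q => (q.1, q.2.items)),
   res.2.items.map (fun q => (q.1, q.2.items)))

-- ===== PRECONDITION & SPEC =====
-- Pre_ excludes the inputs on which A raises (correct_umi's 'zip(*sorted(...))' raises
-- ValueError whenever some barcode's UMI dict is empty) and association lists with duplicate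
-- barcode or UMI keys, whose reading as a dict (first- vs last-binding wins) is ambiguous.
def Pre_get_pibc_new_umis (dic_A : List (String × List (String × Int))) : Prop :=
  (∀ p ∈ dic_A, p.2 ≠ []) ∧ (dic_A.map Prod.fst).Nodup ∧
    ∀ p ∈ dic_A, (p.2.map Prod.fst).Nodup
instance (dic_A : List (String × List (String × Int))) : Decidable (Pre_get_pibc_new_umis dic_A) := by
  unfold Pre_get_pibc_new_umis; infer_instance

def pvWitness_get_pibc_new_umis : (List (String × List (String × Int))) :=
  [("b", [("AAA", 10), ("AAT", 1), ("CCC", 5)])]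

-- On inputs where some barcode's (final) UMI dict is empty, A raises ValueError; B returns
-- the input barcode with an empty count dict and an empty correction map.
def Raises_get_pibc_new_umis (dic_A : List (String × List (String × Int))) : Prop :=
  ∃ p ∈ dic_A, (dic_A.find? (fun q => q.1 == p.1)).map Prod.snd = some ([] : List (String × Int))
instance (dic_A : List (String × List (String × Int))) : Decidable (Raises_get_pibc_new_umis dic_A) := by
  unfold Raises_get_pibc_new_umis; infer_instance

def pvRaiseWitness_get_pibc_new_umis : (List (String × List (String × Int))) :=
  [("b", [])]
def pvRaiseWitnessOut_get_pibc_new_umis :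
    (List (String × List (String × Int))) × (List (String × List (String × String))) :=
  ([("b", [])], [("b", [])])

def Spec_get_pibc_new_umis (dic_A : List (String × List (String × Int)))
    (out : (List (String × List (String × Int))) × (List (String × List (String × String)))) : Prop :=
  out = get_pibc_new_umis_alt dic_A
instance (dic_A : List (String × List (String × Int)))
    (out : (List (String × List (String × Int))) × (List (String × List (String × String)))) :
    Decidable (Spec_get_pibc_new_umis dic_A out) := by
  unfold Spec_get_pibc_new_umis; infer_instance

-- ===== CLAIM (what is proved, stated in full; the proofs are below) =====
def Claim_equal_get_pibc_new_umis : Prop :=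
  ∀ (dic_A : List (String × List (String × Int))), Dom_get_pibc_new_umis dic_A →
    Pre_get_pibc_new_umis dic_A → Spec_get_pibc_new_umis dic_A (get_pibc_new_umis dic_A)

def Claim_raises_get_pibc_new_umis : Prop :=
  (∀ (dic_A : List (String × List (String × Int))), Dom_get_pibc_new_umis dic_A →
    Raises_get_pibc_new_umis dic_A → ¬ Pre_get_pibc_new_umis dic_A) ∧
  (Dom_get_pibc_new_umis (pvRaiseWitness_get_pibc_new_umis) ∧
    Raises_get_pibc_new_umis (pvRaiseWitness_get_pibc_new_umis) ∧
    get_pibc_new_umis_alt (pvRaiseWitness_get_pibc_new_umis) = pvRaiseWitnessOut_get_pibc_new_umis)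

-- ===== LEMMAS AND PROOFS =====

-- proof-side abbreviations for the two programs' common combinatorics
def pvMismatches (u v : String) : Int :=
  ((u.toList.zip v.toList).map (fun p => if p.1 ≠ p.2 then (1 : Int) else 0)).sum

-- "first qualifying representative" without the count-sorted break
def pvFirstTgt (less : String) (lc : Int) : Int → List (String × Int) → Option Int
  | _, [] => none
  | r, p :: rest =>
    if lc ≤ PySem.Int.floordiv p.2 10 ∧ pvMismatches less p.1 ≤ 1 then some r
    else pvFirstTgt less lc (r + 1) rest

-- the canonical grouped mapping list: entries grouped by target position r onwards
def pvGrp (descP ascP : List (String × Int)) : Int → List (String × Int) → List (String × String)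
  | _, [] => []
  | r, p :: ds =>
    (ascP.filter (fun a => pvFirstTgt a.1 a.2 0 descP = some r)).map (fun a => (a.1, p.1))
      ++ pvGrp descP ascP (r + 1) ds

theorem pv_mism_nonneg (zs : List (Char × Char)) :
    0 ≤ (zs.map (fun p => if p.1 ≠ p.2 then (1 : Int) else 0)).sum := by
  induction zs with
  | nil => simp
  | cons a t ih => simp only [List.map_cons, List.sum_cons]; split <;> omega

theorem pv_hamLoop_iff (zs : List (Char × Char)) : ∀ d : Int, 0 ≤ d → d ≤ 1 →
    (pvHamLoopA 1 d zs ≠ 0 ↔ d + (zs.map (fun p => if p.1 ≠ p.2 then (1 : Int) else 0)).sum ≤ 1) := by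
  induction zs with
  | nil => intro d h0 h1; simp [pvHamLoopA]; omega
  | cons a t ih =>
    intro d h0 h1
    have hnn := pv_mism_nonneg t
    simp only [pvHamLoopA, List.map_cons, List.sum_cons]
    by_cases hne : a.1 ≠ a.2
    · simp only [if_pos hne]
      by_cases hgt : d + 1 > 1
      · rw [if_pos hgt]; constructor
        · intro h; exact absurd rfl h
        · intro h; omega
      · rw [if_neg hgt, ih (d+1) (by omega) (by omega)]; omega
    · simp only [if_neg hne]
      rw [ih d h0 h1]; omega

theorem pv_ham_iff (s t : String) :
    (is_below_hamming_threshold s t 1 ≠ 0) ↔ pvMismatches s t ≤ 1 := by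
  have := pv_hamLoop_iff (s.toList.zip t.toList) 0 le_rfl (by omega)
  simpa [is_below_hamming_threshold, pvMismatches] using this

theorem pv_firstTgt_bounds (less : String) (lc : Int) :
    ∀ (xs : List (String × Int)) (r j : Int), pvFirstTgt less lc r xs = some j →
      r ≤ j ∧ j < r + xs.length := by
  intro xs
  induction xs with
  | nil => intro r j h; simp [pvFirstTgt] at h
  | cons p rest ih =>
    intro r j h
    simp only [pvFirstTgt] at h
    split at h
    · cases h; simp only [List.length_cons]; push_cast; omega
    · have := ih (r+1) j h
      simp only [List.length_cons]
      push_cast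
      push_cast at this
      omega

theorem pv_firstTgt_append_some (less : String) (lc : Int) :
    ∀ (xs ys : List (String × Int)) (r j : Int), pvFirstTgt less lc r xs = some j →
      pvFirstTgt less lc r (xs ++ ys) = some j := by
  intro xs
  induction xs with
  | nil => intro ys r j h; simp [pvFirstTgt] at h
  | cons p rest ih =>
    intro ys r j h
    rw [List.cons_append]
    simp only [pvFirstTgt] at h ⊢
    split at h
    · rw [if_pos ‹_›]; exact h
    · rw [if_neg ‹_›]; exact ih ys (r+1) j h

theorem pv_firstTgt_append_none (less : String) (lc : Int) :
    ∀ (xs ys : List (String × Int)) (r : Int), pvFirstTgt less lc r xs = none →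
      pvFirstTgt less lc r (xs ++ ys) = pvFirstTgt less lc (r + xs.length) ys := by
  intro xs
  induction xs with
  | nil => intro ys r _; simp
  | cons p rest ih =>
    intro ys r h
    rw [List.cons_append]
    simp only [pvFirstTgt] at h ⊢
    split at h
    · exact absurd h (by simp)
    · rw [if_neg ‹_›, ih ys (r+1) h]
      congr 1
      simp only [List.length_cons]
      push_cast
      ring

theorem pv_key_inj {ν : Type} {l : List (String × ν)} (hn : (l.map Prod.fst).Nodup)
    {a b : String × ν} (ha : a ∈ l) (hb : b ∈ l) (h : a.1 = b.1) : a = b := by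
  exact List.inj_on_of_nodup_map hn ha hb h

theorem pv_firstTgt_at (descP done ds' : List (String × Int)) (raw : String) (c : Int)
    (hd : descP = done ++ (raw, c) :: ds') (a : String × Int)
    (hnot : ¬ ∃ j, pvFirstTgt a.1 a.2 0 descP = some j ∧ j < (done.length : Int)) :
    pvFirstTgt a.1 a.2 0 descP
      = if a.2 ≤ PySem.Int.floordiv c 10 ∧ pvMismatches a.1 raw ≤ 1 then some (done.length : Int)
        else pvFirstTgt a.1 a.2 ((done.length : Int) + 1) ds' := by
  have hnone : pvFirstTgt a.1 a.2 0 done = none := by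
    cases hfd : pvFirstTgt a.1 a.2 0 done with
    | none => rfl
    | some j =>
      exfalso
      have hb := pv_firstTgt_bounds a.1 a.2 done 0 j hfd
      exact hnot ⟨j, hd ▸ pv_firstTgt_append_some a.1 a.2 done ((raw, c) :: ds') 0 j hfd, by omega⟩
  rw [hd, pv_firstTgt_append_none a.1 a.2 done ((raw, c) :: ds') 0 hnone]
  simp only [pvFirstTgt, zero_add]

theorem pv_innerA_items (descP done ds' : List (String × Int)) (raw : String) (c : Int)
    (hd : descP = done ++ (raw, c) :: ds') :
    ∀ (as : List (String × Int)) (m : PySem.Dict String String),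
      as.Pairwise (fun a b => a.2 ≤ b.2) →
      (as.map Prod.fst).Nodup →
      (∀ a ∈ as, m.contains a.1 = true ↔
        ∃ j, pvFirstTgt a.1 a.2 0 descP = some j ∧ j < (done.length : Int)) →
      (pvInnerA raw (PySem.Int.floordiv c 10) m as).items
        = m.items ++ (as.filter
            (fun a => pvFirstTgt a.1 a.2 0 descP = some (done.length : Int))).map
            (fun a => (a.1, raw)) := by
  intro as
  induction as with
  | nil => intro m _ _ _; simp [pvInnerA]
  | cons a rest ih =>
    intro m hpair hnod hc
    have hpair' := (List.pairwise_cons.mp hpair).2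
    have hale := (List.pairwise_cons.mp hpair).1
    simp only [List.map_cons, List.nodup_cons] at hnod
    have hca := hc a (List.mem_cons_self)
    simp only [pvInnerA]
    by_cases hmem : m.contains a.1 = true
    · -- a already mapped: its first target is < done.length, so ≠ done.length
      rw [if_pos hmem]
      obtain ⟨j, hj, hjlt⟩ := hca.mp hmem
      have hne : ¬ (pvFirstTgt a.1 a.2 0 descP = some (done.length : Int)) := by
        rw [hj]; intro h; cases h; omega
      rw [List.filter_cons_of_neg (by simpa using hne)]
      exact ih m hpair' hnod.2 (fun b hb => hc b (List.mem_cons_of_mem _ hb))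
    · rw [if_neg hmem]
      have hnotex : ¬ ∃ j, pvFirstTgt a.1 a.2 0 descP = some j ∧ j < (done.length : Int) := by
        intro hx; exact hmem (hca.mpr hx)
      have hat := pv_firstTgt_at descP done ds' raw c hd a hnotex
      by_cases hcnt : a.2 ≤ PySem.Int.floordiv c 10
      · rw [if_pos hcnt]
        by_cases hham : is_below_hamming_threshold a.1 raw 1 ≠ 0
        · rw [if_pos hham]
          have hq : pvFirstTgt a.1 a.2 0 descP = some (done.length : Int) := by
            rw [hat, if_pos ⟨hcnt, (pv_ham_iff a.1 raw).mp hham⟩]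
          rw [List.filter_cons_of_pos (by simpa using hq)]
          have hmem' : (m.insert a.1 raw).contains a.1 = true :=
            PySem.Dict.contains_insert_self m a.1 raw
          rw [ih (m.insert a.1 raw) hpair' hnod.2 ?hc']
          · rw [PySem.Dict.items_insert_of_not_contains m raw (by simpa using hmem)]
            simp [List.map_cons]
          case hc' =>
            intro b hb
            rw [PySem.Dict.contains_insert]
            have hbne : (b.1 == a.1) = false := by
              simp only [beq_eq_false_iff_ne, ne_eq]
              intro hbeq
              exact hnod.1 (hbeq ▸ List.mem_map_of_mem hb)
            rw [hbne, Bool.false_or]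
            exact hc b (List.mem_cons_of_mem _ hb)
        · rw [if_neg hham]
          have hq : ¬ (pvFirstTgt a.1 a.2 0 descP = some (done.length : Int)) := by
            rw [hat, if_neg (by
              intro ⟨_, h2⟩
              exact hham ((pv_ham_iff a.1 raw).mpr h2))]
            intro h
            have := pv_firstTgt_bounds a.1 a.2 ds' ((done.length : Int) + 1) _ h
            omega
          rw [List.filter_cons_of_neg (by simpa using hq)]
          exact ih m hpair' hnod.2 (fun b hb => hc b (List.mem_cons_of_mem _ hb))
      · -- break: nothing below the count bound remains (asc is sorted by count)
        rw [if_neg hcnt]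
        have hnil : (List.filter
            (fun a => decide (pvFirstTgt a.1 a.2 0 descP = some (done.length : Int)))
            (a :: rest)) = [] := by
          rw [List.filter_eq_nil_iff]
          intro b hb
          simp only [decide_eq_true_eq]
          have hble : ¬ b.2 ≤ PySem.Int.floordiv c 10 := by
            rcases List.mem_cons.mp hb with rfl | hbr
            · exact hcnt
            · have := hale b hbr; intro hle; exact hcnt (by omega)
          -- b's first target cannot be done.length: the count condition fails there
          intro hbq
          rcases Classical.em (∃ j, pvFirstTgt b.1 b.2 0 descP = some j ∧ j < (done.length : Int)) with hex | hnex
          · obtain ⟨j, hj, hjlt⟩ := hex; rw [hj] at hbq; cases hbq; omega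
          · have hbat := pv_firstTgt_at descP done ds' raw c hd b hnex
            rw [hbat, if_neg (fun hx => hble hx.1)] at hbq
            have := pv_firstTgt_bounds b.1 b.2 ds' ((done.length : Int) + 1) _ hbq
            omega
        rw [hnil]
        simp

theorem pv_outerA_items (ascP descP : List (String × Int))
    (hpair : ascP.Pairwise (fun a b => a.2 ≤ b.2)) (hnod : (ascP.map Prod.fst).Nodup) :
    ∀ (ds done : List (String × Int)) (m : PySem.Dict String String),
      descP = done ++ ds →
      (∀ a ∈ ascP, m.contains a.1 = true ↔
        ∃ j, pvFirstTgt a.1 a.2 0 descP = some j ∧ j < (done.length : Int)) →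
      (ds.foldl (fun m p => pvInnerA p.1 (PySem.Int.floordiv p.2 10) m ascP) m).items
        = m.items ++ pvGrp descP ascP (done.length : Int) ds := by
  intro ds
  induction ds with
  | nil => intro done m _ _; simp [pvGrp]
  | cons p ds ih =>
    intro done m hd hc
    have hd' : descP = done ++ (p.1, p.2) :: ds := by rw [Prod.mk.eta]; exact hd
    have hinner := pv_innerA_items descP done ds p.1 p.2 hd' ascP m hpair hnod hc
    rw [List.foldl_cons]
    have hc' : ∀ a ∈ ascP,
        (pvInnerA p.1 (PySem.Int.floordiv p.2 10) m ascP).contains a.1 = true ↔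
        ∃ j, pvFirstTgt a.1 a.2 0 descP = some j ∧ j < ((done ++ [p]).length : Int) := by
      intro a ha
      rw [PySem.Dict.contains_iff_mem_keys]
      have hkeys : (pvInnerA p.1 (PySem.Int.floordiv p.2 10) m ascP).keys
          = (pvInnerA p.1 (PySem.Int.floordiv p.2 10) m ascP).items.map Prod.fst := rfl
      rw [hkeys, hinner, List.map_append, List.mem_append, List.map_map]
      have h1 : a.1 ∈ m.items.map Prod.fst ↔ m.contains a.1 = true := by
        rw [PySem.Dict.contains_iff_mem_keys]; rfl
      have h2 : a.1 ∈ (List.filter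
            (fun a => decide (pvFirstTgt a.1 a.2 0 descP = some (done.length : Int))) ascP).map
            (Prod.fst ∘ fun a => (a.1, p.1))
          ↔ pvFirstTgt a.1 a.2 0 descP = some (done.length : Int) := by
        constructor
        · intro hmem
          obtain ⟨b, hb, hba⟩ := List.mem_map.mp hmem
          have hbf := List.mem_filter.mp hb
          have : b = a := pv_key_inj hnod hbf.1 ha hba
          subst this
          exact of_decide_eq_true hbf.2
        · intro hq
          exact List.mem_map.mpr ⟨a, List.mem_filter.mpr ⟨ha, decide_eq_true hq⟩, rfl⟩
      rw [h1, h2, hc a ha]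
      simp only [List.length_append, List.length_cons, List.length_nil]
      constructor
      · rintro (⟨j, hj, hlt⟩ | hq)
        · exact ⟨j, hj, by push_cast; omega⟩
        · exact ⟨_, hq, by push_cast; omega⟩
      · rintro ⟨j, hj, hlt⟩
        by_cases hjr : j < (done.length : Int)
        · exact Or.inl ⟨j, hj, hjr⟩
        · have hje : j = (done.length : Int) := by push_cast at hlt; omega
          exact Or.inr (hje ▸ hj)
    have hd2 : descP = (done ++ [p]) ++ ds := by
      rw [List.append_assoc]; simpa using hd
    rw [ih (done ++ [p]) _ hd2 hc', hinner, pvGrp]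
    have hlen : (((done ++ [p]).length : Nat) : Int) = (done.length : Int) + 1 := by
      simp
    rw [hlen, List.append_assoc]

theorem pv_correctA_items (u : PySem.Dict String Int) (hn : u.keys.Nodup) :
    (correct_umi u).items
      = pvGrp (PySem.List.sorted u.items (fun kv => kv.2) true)
              (PySem.List.sorted u.items (fun kv => kv.2) false) 0
              (PySem.List.sorted u.items (fun kv => kv.2) true) := by
  have hpair := PySem.List.sorted_pairwise u.items (fun kv => kv.2)
  have hnod : ((PySem.List.sorted u.items (fun kv => kv.2) false).map Prod.fst).Nodup := by
    have hperm := (PySem.List.sorted_perm u.items (fun kv => kv.2) false).map Prod.fst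
    exact hperm.nodup_iff.mpr hn
  have h := pv_outerA_items (PySem.List.sorted u.items (fun kv => kv.2) false)
    (PySem.List.sorted u.items (fun kv => kv.2) true) hpair hnod
    (PySem.List.sorted u.items (fun kv => kv.2) true) [] PySem.Dict.empty (by simp)
    (by
      intro a _
      rw [PySem.Dict.contains_empty]
      constructor
      · intro h; cases h
      · rintro ⟨j, hj, hlt⟩
        have := pv_firstTgt_bounds a.1 a.2 _ 0 j hj
        simp at hlt
        omega)
  simp only [correct_umi]
  simpa using h

theorem pv_floordiv10_mono {a b : Int} (h : a ≤ b) :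
    PySem.Int.floordiv a 10 ≤ PySem.Int.floordiv b 10 := by
  rw [PySem.Int.floordiv_eq_ediv_of_pos (by norm_num),
    PySem.Int.floordiv_eq_ediv_of_pos (by norm_num)]
  exact Int.ediv_le_ediv (by norm_num) h

theorem pv_firstTgt_none_of_fail (u : String) (c : Int) :
    ∀ (l : List (String × Int)) (r : Int), (∀ q ∈ l, ¬ c ≤ PySem.Int.floordiv q.2 10) →
      pvFirstTgt u c r l = none := by
  intro l
  induction l with
  | nil => intro r _; rfl
  | cons p rest ih =>
    intro r hf
    simp only [pvFirstTgt]
    rw [if_neg (fun hx => hf p List.mem_cons_self hx.1)]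
    exact ih (r + 1) (fun q hq => hf q (List.mem_cons_of_mem _ hq))

theorem pv_firstTgtB_eq (u : String) (c : Int) :
    ∀ (l : List (String × Int)), l.Pairwise (fun a b => b.2 ≤ a.2) →
      ∀ r, pvFirstTgtB u c r l = pvFirstTgt u c r l := by
  intro l
  induction l with
  | nil => intro _ r; rfl
  | cons p rest ih =>
    intro hpair r
    have hle := (List.pairwise_cons.mp hpair).1
    have hrest := (List.pairwise_cons.mp hpair).2
    simp only [pvFirstTgtB, pvFirstTgt]
    have hmism : ((u.toList.zip p.1.toList).map (fun q => if q.1 ≠ q.2 then (1 : Int) else 0)).sum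
        = pvMismatches u p.1 := rfl
    by_cases hlt : PySem.Int.floordiv p.2 10 < c
    · rw [if_pos hlt, if_neg (by intro hx; omega)]
      rw [pv_firstTgt_none_of_fail u c rest (r + 1) (fun q hq hx => by
        have := pv_floordiv10_mono (hle q hq)
        omega)]
    · rw [if_neg hlt, hmism]
      by_cases hm : pvMismatches u p.1 ≤ 1
      · rw [if_pos hm, if_pos ⟨by omega, hm⟩]
      · rw [if_neg hm, if_neg (by intro hx; exact hm hx.2), ih hrest (r + 1)]

theorem pv_clusters_getD (descP : List (String × Int)) :
    ∀ (as : List (String × Int)) (d : PySem.Dict Int (List String)) (r : Int),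
      (∀ a ∈ as, pvFirstTgtB a.1 a.2 0 descP = pvFirstTgt a.1 a.2 0 descP) →
      (as.foldl (fun d p =>
          match pvFirstTgtB p.1 p.2 0 descP with
          | some r' => d.modify r' [] (fun l => l ++ [p.1])
          | none => d) d).getD r []
        = d.getD r []
          ++ (as.filter (fun a => pvFirstTgt a.1 a.2 0 descP = some r)).map Prod.fst := by
  intro as
  induction as with
  | nil => intro d r _; simp
  | cons a rest ih =>
    intro d r hT
    rw [List.foldl_cons, List.filter_cons]
    have hTa := hT a List.mem_cons_self
    have hrest := fun b hb => hT b (List.mem_cons_of_mem _ hb)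
    cases hft : pvFirstTgt a.1 a.2 0 descP with
    | none =>
      rw [hTa, hft]
      rw [if_neg (by simp)]
      exact ih d r hrest
    | some r' =>
      rw [hTa, hft]
      dsimp only
      by_cases hrr : r' = r
      · subst hrr
        rw [if_pos (by simp)]
        rw [ih _ _ hrest, PySem.Dict.getD_modify, if_pos rfl]
        simp
      · rw [if_neg (by simp [hrr])]
        rw [ih _ _ hrest, PySem.Dict.getD_modify, if_neg (Ne.symm hrr)]

theorem pv_insert_fold_items (v : String) :
    ∀ (l : List String) (m : PySem.Dict String String), l.Nodup →
      (∀ u ∈ l, m.contains u = false) →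
      (l.foldl (fun m u => m.insert u v) m).items
        = m.items ++ l.map (fun u => (u, v)) := by
  intro l
  induction l with
  | nil => intro m _ _; simp
  | cons u us ih =>
    intro m hn hfr
    have hnu := List.nodup_cons.mp hn
    rw [List.foldl_cons, List.map_cons]
    rw [ih _ hnu.2 ?hfr']
    · rw [PySem.Dict.items_insert_of_not_contains m v (hfr u List.mem_cons_self)]
      simp
    case hfr' =>
      intro w hw
      rw [PySem.Dict.contains_insert]
      have hvne : (w == u) = false := by
        simp only [beq_eq_false_iff_ne, ne_eq]
        intro hh; exact hnu.1 (hh ▸ hw)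
      rw [hvne, Bool.false_or]
      exact hfr w (List.mem_cons_of_mem _ hw)

theorem pv_emitB (descP ascP : List (String × Int))
    (hnod : (ascP.map Prod.fst).Nodup)
    (C : PySem.Dict Int (List String))
    (hG : ∀ r, C.getD r []
      = (ascP.filter (fun a => pvFirstTgt a.1 a.2 0 descP = some r)).map Prod.fst) :
    ∀ (ds : List (String × Int)) (s : Int) (m : PySem.Dict String String),
      (∀ a ∈ ascP, ∀ r', pvFirstTgt a.1 a.2 0 descP = some r' → s ≤ r' →
        m.contains a.1 = false) →
      ((PySem.List.enumerate ds s).foldl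
          (fun m rp => (C.getD rp.1 []).foldl (fun m u => m.insert u rp.2.1) m) m).items
        = m.items ++ pvGrp descP ascP s ds := by
  intro ds
  induction ds with
  | nil => intro s m _; simp [PySem.List.enumerate, pvGrp]
  | cons p ds ih =>
    intro s m hf
    rw [PySem.List.enumerate_cons, List.foldl_cons]
    have hsub : (ascP.filter
        (fun a => decide (pvFirstTgt a.1 a.2 0 descP = some s))).Sublist ascP :=
      List.filter_sublist
    have hGnodup : (C.getD s []).Nodup := by
      rw [hG s]
      exact (hsub.map Prod.fst).nodup hnod
    have hGfresh : ∀ u ∈ C.getD s [], m.contains u = false := by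
      intro u hu
      rw [hG s] at hu
      obtain ⟨a, ha, rfl⟩ := List.mem_map.mp hu
      have haf := List.mem_filter.mp ha
      exact hf a haf.1 s (of_decide_eq_true haf.2) le_rfl
    have hinner := pv_insert_fold_items p.1 (C.getD s []) m hGnodup hGfresh
    have hf' : ∀ a ∈ ascP, ∀ r', pvFirstTgt a.1 a.2 0 descP = some r' → s + 1 ≤ r' →
        ((C.getD s []).foldl (fun m u => m.insert u p.1) m).contains a.1 = false := by
      intro a ha r' hr' hs
      cases hb : ((C.getD s []).foldl (fun m u => m.insert u p.1) m).contains a.1 with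
      | false => rfl
      | true =>
        exfalso
        rw [PySem.Dict.contains_iff_mem_keys] at hb
        have hkeys : ((C.getD s []).foldl (fun m u => m.insert u p.1) m).keys
            = ((C.getD s []).foldl (fun m u => m.insert u p.1) m).items.map Prod.fst := rfl
        rw [hkeys, hinner, List.map_append, List.mem_append, List.map_map] at hb
        rcases hb with hb | hb
        · have : m.contains a.1 = true := by
            rw [PySem.Dict.contains_iff_mem_keys]; exact hb
          rw [hf a ha r' hr' (by omega)] at this
          cases this
        · rw [hG s] at hb
          simp only [List.map_map] at hb
          obtain ⟨b, hbf, hba⟩ := List.mem_map.mp hb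
          have hbm := List.mem_filter.mp hbf
          have : b = a := pv_key_inj hnod hbm.1 ha hba
          subst this
          have := of_decide_eq_true hbm.2
          rw [hr'] at this
          cases this
          omega
    rw [ih (s + 1) _ hf', hinner, pvGrp, List.append_assoc, hG s, List.map_map]
    exact congrArg (fun t => m.items ++ t)
      (congrArg (fun t => t ++ pvGrp descP ascP (s + 1) ds)
        (List.map_congr_left (fun a _ => rfl)))

theorem pv_correct_eq (u : PySem.Dict String Int) (hn : u.keys.Nodup) :
    correct_umi u = pvCorrectB u := by
  have hnodasc : ((PySem.List.sorted u.items (fun kv => kv.2) false).map Prod.fst).Nodup := by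
    have hperm := (PySem.List.sorted_perm u.items (fun kv => kv.2) false).map Prod.fst
    exact hperm.nodup_iff.mpr hn
  have hpairdesc : (PySem.List.sorted u.items (fun kv => kv.2) true).Pairwise
      (fun a b => b.2 ≤ a.2) := PySem.List.sorted_pairwise_rev u.items (fun kv => kv.2)
  have hT : ∀ a : String × Int,
      pvFirstTgtB a.1 a.2 0 (PySem.List.sorted u.items (fun kv => kv.2) true)
        = pvFirstTgt a.1 a.2 0 (PySem.List.sorted u.items (fun kv => kv.2) true) :=
    fun a => pv_firstTgtB_eq a.1 a.2 _ hpairdesc 0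
  apply PySem.Dict.ext
  rw [pv_correctA_items u hn]
  simp only [pvCorrectB]
  rw [pv_emitB (PySem.List.sorted u.items (fun kv => kv.2) true)
    (PySem.List.sorted u.items (fun kv => kv.2) false) hnodasc
    ((PySem.List.sorted u.items (fun kv => kv.2) false).foldl
      (fun d p =>
        match pvFirstTgtB p.1 p.2 0 (PySem.List.sorted u.items (fun kv => kv.2) true) with
        | some r => d.modify r [] (fun l => l ++ [p.1])
        | none => d)
      PySem.Dict.empty)
    (fun r => by
      rw [pv_clusters_getD (PySem.List.sorted u.items (fun kv => kv.2) true)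
        (PySem.List.sorted u.items (fun kv => kv.2) false) PySem.Dict.empty r
        (fun a _ => hT a)]
      simp)
    (PySem.List.sorted u.items (fun kv => kv.2) true) 0 PySem.Dict.empty
    (fun a _ r' _ _ => PySem.Dict.contains_empty a.1)]
  have hempty : (PySem.Dict.empty : PySem.Dict String String).items = [] := rfl
  rw [hempty, List.nil_append]

theorem pv_grp_mem (descP ascP : List (String × Int)) :
    ∀ (ds : List (String × Int)) (r : Int) (e : String × String),
      e ∈ pvGrp descP ascP r ds →
      (∃ a ∈ ascP, a.1 = e.1) ∧ (∃ p ∈ ds, p.1 = e.2) := by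
  intro ds
  induction ds with
  | nil => intro r e h; cases h
  | cons p rest ih =>
    intro r e h
    rw [pvGrp, List.mem_append] at h
    rcases h with h | h
    · obtain ⟨a, ha, rfl⟩ := List.mem_map.mp h
      exact ⟨⟨a, (List.mem_filter.mp ha).1, rfl⟩, ⟨p, List.mem_cons_self, rfl⟩⟩
    · obtain ⟨h1, q, hq, hq2⟩ := ih (r + 1) e h
      exact ⟨h1, ⟨q, List.mem_cons_of_mem _ hq, hq2⟩⟩

theorem pv_erase_items (d : PySem.Dict String Int) (k : String) :
    (d.erase k).items = d.items.filter (fun p => !(p.1 == k)) := by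
  cases d
  simp [PySem.Dict.erase]

theorem pv_applyA_keys (u : PySem.Dict String Int) :
    ∀ (P : List (String × String)) (d : PySem.Dict String Int),
      (∀ kv ∈ P, u.contains kv.1 = true ∧ u.contains kv.2 = true) →
      d.keys = u.keys →
      (P.foldl (fun nw kv => (nw.modify kv.2 0 (fun t => t + u.getD kv.1 0)).insert kv.1 0) d).keys
        = u.keys := by
  intro P
  induction P with
  | nil => intro d _ h; simpa using h
  | cons kv rest ih =>
    intro d hmem hk
    rw [List.foldl_cons]
    apply ih _ (fun b hb => hmem b (List.mem_cons_of_mem _ hb))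
    have hc2 : d.contains kv.2 = true := by
      rw [PySem.Dict.contains_iff_mem_keys, hk, ← PySem.Dict.contains_iff_mem_keys]
      exact (hmem kv List.mem_cons_self).2
    have hkm : (d.modify kv.2 0 (fun t => t + u.getD kv.1 0)).keys = u.keys := by
      rw [PySem.Dict.keys_modify, PySem.Dict.keys_insert_of_contains d _ hc2, hk]
    have hc1 : (d.modify kv.2 0 (fun t => t + u.getD kv.1 0)).contains kv.1 = true := by
      rw [PySem.Dict.contains_iff_mem_keys, hkm, ← PySem.Dict.contains_iff_mem_keys]
      exact (hmem kv List.mem_cons_self).1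
    rw [PySem.Dict.keys_insert_of_contains _ _ hc1, hkm]

def pvZeroKeys (l : List (String × Int)) : List String :=
  (l.filter (fun kv => kv.2 == 0)).map Prod.fst

theorem pv_eraseFold_items :
    ∀ (l : List (String × Int)) (d : PySem.Dict String Int),
      (l.foldl (fun nw kv => if kv.2 = 0 then nw.erase kv.1 else nw) d).items
        = d.items.filter (fun p => !((pvZeroKeys l).contains p.1)) := by
  intro l
  induction l with
  | nil =>
    intro d
    simp [pvZeroKeys]
  | cons kv rest ih =>
    intro d
    rw [List.foldl_cons]
    by_cases h : kv.2 = 0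
    · rw [if_pos h, ih, pv_erase_items, List.filter_filter]
      have hzk : pvZeroKeys (kv :: rest) = kv.1 :: pvZeroKeys rest := by
        unfold pvZeroKeys
        rw [List.filter_cons_of_pos (by simpa using h)]
        simp
      rw [hzk]
      apply List.filter_congr
      intro p _
      simp only [List.contains_cons]
      cases hpk : p.1 == kv.1 <;> cases hpc : (pvZeroKeys rest).contains p.1 <;> simp
    · rw [if_neg h, ih]
      have hzk : pvZeroKeys (kv :: rest) = pvZeroKeys rest := by
        unfold pvZeroKeys
        rw [List.filter_cons_of_neg (by simpa using h)]
      rw [hzk]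

theorem pv_insertIf_fold_items :
    ∀ (l : List (String × Int)) (d : PySem.Dict String Int),
      (l.map Prod.fst).Nodup →
      (∀ kv ∈ l, d.contains kv.1 = false) →
      (l.foldl (fun d p => if p.2 ≠ 0 then d.insert p.1 p.2 else d) d).items
        = d.items ++ l.filter (fun p => !(p.2 == 0)) := by
  intro l
  induction l with
  | nil => intro d _ _; simp
  | cons kv rest ih =>
    intro d hnod hf
    simp only [List.map_cons, List.nodup_cons] at hnod
    rw [List.foldl_cons, List.filter_cons]
    by_cases h : kv.2 = 0
    · rw [if_neg (by simpa using h)]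
      simp only [h, BEq.rfl, Bool.not_true, Bool.false_eq_true, if_false]
      exact ih d hnod.2 (fun b hb => hf b (List.mem_cons_of_mem _ hb))
    · rw [if_pos h]
      have hb : (!(kv.2 == 0)) = true := by simpa using h
      rw [hb, if_pos rfl]
      rw [ih _ hnod.2 ?fresh]
      · rw [PySem.Dict.items_insert_of_not_contains d _ (hf kv List.mem_cons_self)]
        simp
      case fresh =>
        intro b hbm
        rw [PySem.Dict.contains_insert]
        have hbne : (b.1 == kv.1) = false := by
          simp only [beq_eq_false_iff_ne, ne_eq]
          intro hbeq
          exact hnod.1 (hbeq ▸ List.mem_map_of_mem hbm)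
        rw [hbne, Bool.false_or]
        exact hf b (List.mem_cons_of_mem _ hbm)

theorem pv_barcode (u : PySem.Dict String Int) (hnu : u.keys.Nodup) :
    (pvApplyA u (correct_umi u)).items = (pvMergeB u (pvCorrectB u)).items := by
  rw [← pv_correct_eq u hnu]
  simp only [pvApplyA, pvMergeB]
  have hmem : ∀ kv ∈ (correct_umi u).items,
      u.contains kv.1 = true ∧ u.contains kv.2 = true := by
    intro kv hkv
    rw [pv_correctA_items u hnu] at hkv
    obtain ⟨⟨a, ha, ha1⟩, ⟨p, hp, hp1⟩⟩ := pv_grp_mem _ _ _ 0 kv hkv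
    rw [PySem.List.mem_sorted] at ha hp
    constructor
    · rw [PySem.Dict.contains_iff_mem_keys]
      exact ha1 ▸ List.mem_map_of_mem ha
    · rw [PySem.Dict.contains_iff_mem_keys]
      exact hp1 ▸ List.mem_map_of_mem hp
  have hkeys := pv_applyA_keys u (correct_umi u).items u hmem rfl
  have hnod1 : (((correct_umi u).items.foldl
      (fun nw kv => (nw.modify kv.2 0 (fun x => x + u.getD kv.1 0)).insert kv.1 0) u).items.map
      Prod.fst).Nodup := by
    have : (((correct_umi u).items.foldl
        (fun nw kv => (nw.modify kv.2 0 (fun x => x + u.getD kv.1 0)).insert kv.1 0) u).keys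
        = u.keys) := hkeys
    show (((correct_umi u).items.foldl
        (fun nw kv => (nw.modify kv.2 0 (fun x => x + u.getD kv.1 0)).insert kv.1 0) u).keys).Nodup
    rw [this]; exact hnu
  rw [pv_eraseFold_items, pv_insertIf_fold_items _ _ hnod1
    (fun kv _ => PySem.Dict.contains_empty kv.1)]
  have hempty : (PySem.Dict.empty : PySem.Dict String Int).items = [] := rfl
  rw [hempty, List.nil_append]
  apply List.filter_congr
  intro p hp
  apply congrArg
  rw [Bool.eq_iff_iff, List.contains_iff_mem, beq_iff_eq]
  constructor
  · intro hmem'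
    unfold pvZeroKeys at hmem'
    obtain ⟨q, hq, hq1⟩ := List.mem_map.mp hmem'
    have hqf := List.mem_filter.mp hq
    have : q = p := pv_key_inj hnod1 hqf.1 hp hq1
    subst this
    simpa using hqf.2
  · intro h0
    unfold pvZeroKeys
    exact List.mem_map.mpr ⟨p, List.mem_filter.mpr ⟨hp, by simpa using h0⟩, rfl⟩

theorem pv_mem_items_update {κ ν : Type} [BEq κ] [LawfulBEq κ] :
    ∀ (ps : List (κ × ν)) (d : PySem.Dict κ ν) (q : κ × ν),
      q ∈ (d.update ps).items → q ∈ d.items ∨ q ∈ ps := by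
  intro ps
  induction ps with
  | nil => intro d q h; exact Or.inl h
  | cons p rest ih =>
    intro d q h
    have h' : q ∈ ((d.insert p.1 p.2).update rest).items := h
    rcases ih _ q h' with h2 | h2
    · rcases (PySem.Dict.mem_items_insert d p.1 p.2 q).mp h2 with rfl | ⟨h3, -⟩
      · right
        rw [Prod.mk.eta]
        exact List.mem_cons_self
      · exact Or.inl h3
    · exact Or.inr (List.mem_cons_of_mem _ h2)

theorem pv_find?_self {ν : Type} :
    ∀ (l : List (String × ν)), (l.map Prod.fst).Nodup →
      ∀ q ∈ l, l.find? (fun p => p.1 == q.1) = some q := by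
  intro l
  induction l with
  | nil => intro _ q hq; cases hq
  | cons a t ih =>
    intro hnod q hq
    simp only [List.map_cons, List.nodup_cons] at hnod
    rcases List.mem_cons.mp hq with rfl | hqt
    · rw [List.find?_cons_of_pos (by simp)]
    · rw [List.find?_cons_of_neg (by
        simp only [beq_eq_false_iff_ne, ne_eq, Bool.not_eq_true]
        intro hh
        exact hnod.1 (hh ▸ List.mem_map_of_mem hqt))]
      exact ih hnod.2 q hqt

theorem pv_replace_fold (F : (String × PySem.Dict String Int) → PySem.Dict String Int) :
    ∀ (l : List (String × PySem.Dict String Int)) (d : PySem.Dict String (PySem.Dict String Int)),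
      (l.map Prod.fst).Nodup →
      (∀ p ∈ l, d.contains p.1 = true) →
      (l.foldl (fun dB p => dB.insert p.1 (F p)) d).items
        = d.items.map (fun q =>
            match l.find? (fun p => p.1 == q.1) with
            | some p => (q.1, F p)
            | none => q) := by
  intro l
  induction l with
  | nil =>
    intro d _ _
    rw [List.foldl_nil]
    have hq : ∀ q : String × PySem.Dict String Int,
        (match List.find? (fun p => p.1 == q.1) ([] : List (String × PySem.Dict String Int)) with
          | some p => (q.1, F p) | none => q) = q := fun q => rfl
    rw [List.map_congr_left (fun q _ => hq q)]
    exact (List.map_id' d.items).symm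
  | cons p rest ih =>
    intro d hnod hc
    simp only [List.map_cons, List.nodup_cons] at hnod
    rw [List.foldl_cons]
    have hcp : d.contains p.1 = true := hc p List.mem_cons_self
    have hkeys' : (d.insert p.1 (F p)).keys = d.keys :=
      PySem.Dict.keys_insert_of_contains d _ hcp
    have hc' : ∀ b ∈ rest, (d.insert p.1 (F p)).contains b.1 = true := by
      intro b hb
      rw [PySem.Dict.contains_iff_mem_keys, hkeys', ← PySem.Dict.contains_iff_mem_keys]
      exact hc b (List.mem_cons_of_mem _ hb)
    rw [ih _ hnod.2 hc', PySem.Dict.items_insert_of_contains d _ hcp, List.map_map]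
    apply List.map_congr_left
    intro q _
    simp only [Function.comp_apply]
    by_cases hqp : q.1 = p.1
    · rw [if_pos (by simpa using hqp)]
      have hfr : rest.find? (fun p' => p'.1 == p.1) = none := by
        rw [List.find?_eq_none]
        intro b hb
        simp only [beq_eq_false_iff_ne, ne_eq, Bool.not_eq_true]
        intro hh
        exact hnod.1 (hh ▸ List.mem_map_of_mem hb)
      rw [List.find?_cons_of_pos (by simpa using hqp.symm)]
      simp only [hfr, hqp]
    · rw [if_neg (by simpa using hqp)]
      rw [List.find?_cons_of_neg (by
        simp only [beq_eq_false_iff_ne, ne_eq, Bool.not_eq_true]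
        intro hh
        exact hqp hh.symm)]

theorem pv_main (dic_A : List (String × List (String × Int))) :
    get_pibc_new_umis dic_A = get_pibc_new_umis_alt dic_A := by
  simp only [get_pibc_new_umis, get_pibc_new_umis_alt]
  set dA : PySem.Dict String (PySem.Dict String Int) :=
    PySem.Dict.ofList (dic_A.map (fun p => (p.1, PySem.Dict.ofList p.2))) with hdA
  have hnodA : dA.keys.Nodup := PySem.Dict.nodup_keys_ofList _
  have hnodI : (dA.items.map Prod.fst).Nodup := hnodA
  have hval : ∀ q ∈ dA.items, q.2.keys.Nodup := by
    intro q hq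
    have hq' : q ∈ (PySem.Dict.empty.update (dic_A.map (fun p => (p.1, PySem.Dict.ofList p.2)))).items := hq
    rcases pv_mem_items_update _ PySem.Dict.empty q hq' with h | h
    · cases h
    · obtain ⟨p0, -, hp0⟩ := List.mem_map.mp h
      rw [← hp0]
      exact PySem.Dict.nodup_keys_ofList _
  rw [PySem.List.foldl_prod_mk
    (fun d (p : String × PySem.Dict String Int) => d.insert p.1 (pvApplyA p.2 (correct_umi p.2)))
    (fun (s2 : PySem.Dict String (PySem.Dict String String) × Int) (p : String × PySem.Dict String Int) =>
      (s2.1.insert p.1 (correct_umi p.2), s2.2 + 1))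
    dA.items dA (PySem.Dict.empty, (0 : Int))]
  rw [PySem.List.foldl_prod_mk
    (fun cl (p : String × PySem.Dict String Int) => cl.insert p.1 (correct_umi p.2))
    (fun (n : Int) (p : String × PySem.Dict String Int) => n + 1)
    dA.items PySem.Dict.empty (0 : Int)]
  rw [PySem.List.foldl_prod_mk
    (fun dB (p : String × PySem.Dict String Int) => dB.insert p.1 (pvMergeB p.2 (pvCorrectB p.2)))
    (fun cl (p : String × PySem.Dict String Int) => cl.insert p.1 (pvCorrectB p.2))
    dA.items PySem.Dict.empty PySem.Dict.empty]
  simp only [Prod.mk.injEq]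
  have hcont : ∀ p ∈ dA.items, dA.contains p.1 = true := by
    intro p hp
    rw [PySem.Dict.contains_iff_mem_keys]
    exact List.mem_map_of_mem hp
  rw [pv_replace_fold (fun p => pvApplyA p.2 (correct_umi p.2)) dA.items dA hnodI hcont]
  rw [List.map_congr_left (fun q hq => by
    rw [pv_find?_self dA.items hnodI q hq] :
      ∀ q ∈ dA.items, _ = (q.1, pvApplyA q.2 (correct_umi q.2)))]
  rw [PySem.Dict.items_foldl_insert_fresh dA.items Prod.fst
    (fun p => correct_umi p.2) PySem.Dict.empty
    (fun a _ => PySem.Dict.contains_empty a.1) hnodI]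
  rw [PySem.Dict.items_foldl_insert_fresh dA.items Prod.fst
    (fun p => pvMergeB p.2 (pvCorrectB p.2)) PySem.Dict.empty
    (fun a _ => PySem.Dict.contains_empty a.1) hnodI]
  rw [PySem.Dict.items_foldl_insert_fresh dA.items Prod.fst
    (fun p => pvCorrectB p.2) PySem.Dict.empty
    (fun a _ => PySem.Dict.contains_empty a.1) hnodI]
  constructor
  · rw [List.map_map]
    have hemp : (PySem.Dict.empty : PySem.Dict String (PySem.Dict String Int)).items = [] := rfl
    rw [hemp, List.nil_append, List.map_map]
    apply List.map_congr_left
    intro q hq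
    simp only [Function.comp_apply]
    exact congrArg (fun t => (q.1, t)) (pv_barcode q.2 (hval q hq))
  · have hemp : (PySem.Dict.empty : PySem.Dict String (PySem.Dict String String)).items = [] := rfl
    simp only [hemp, List.nil_append, List.map_map]
    apply List.map_congr_left
    intro q hq
    simp only [Function.comp_apply]
    exact congrArg (fun t => (q.1, t.items)) (pv_correct_eq q.2 (hval q hq))

theorem pv_raises_not_pre (dic_A : List (String × List (String × Int)))
    (h : Raises_get_pibc_new_umis dic_A) : ¬ Pre_get_pibc_new_umis dic_A := by
  obtain ⟨p, hp, hfirst⟩ := h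
  intro hpre
  obtain ⟨q, hq, hq2⟩ := Option.map_eq_some_iff.mp hfirst
  exact hpre.1 q (List.mem_of_find?_eq_some hq) hq2

-- ===== VERDICT (by name: the statement is the Claim_ definition above) =====
theorem get_pibc_new_umis_spec : Claim_equal_get_pibc_new_umis := by
  intro dic_A _ _
  unfold Spec_get_pibc_new_umis
  exact pv_main dic_A

@[simp] theorem get_pibc_new_umis_raises : Claim_raises_get_pibc_new_umis := by
  unfold Claim_raises_get_pibc_new_umis
  exact ⟨fun dic_A _ h => pv_raises_not_pre dic_A h, by decide⟩
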